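-- pv_equiv track=rewrite | github.com/bluegown/Baekjoon-Programmers | 프로그래머스/1/12930. 이상한 문자 만들기/이상한 문자 만들기.py | solution
-- ===== SOURCE A (Python) =====
-- def solution(s):
--     s = list(s)
--     index = 1
--     for i in range(len(s)):
--         if s[i] == ' ':
--             index = 1
--             continue
--         if index % 2 == 1:
--             s[i] = s[i].upper()
--         else:
--             s[i] = s[i].lower()
--         index += 1
--
--
--     return ''.join(s)
-- ===== SOURCE B (Python) =====
-- def solution(s):
--     return ' '.join(
--         ''.join(c.upper() if i % 2 == 0 else c.lower() for i, c in enumerate(w))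
--         for w in s.split(' ')
--     )
-- ===== Notes on version B (the rewrite author's own statement) =====
-- stated objective: idiomatic
-- what changed: Replaces A's flat in-place character pass with a stateful word-position counter by a split(' ') / per-word enumerate / ' '.join decomposition.
import Mathlib
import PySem

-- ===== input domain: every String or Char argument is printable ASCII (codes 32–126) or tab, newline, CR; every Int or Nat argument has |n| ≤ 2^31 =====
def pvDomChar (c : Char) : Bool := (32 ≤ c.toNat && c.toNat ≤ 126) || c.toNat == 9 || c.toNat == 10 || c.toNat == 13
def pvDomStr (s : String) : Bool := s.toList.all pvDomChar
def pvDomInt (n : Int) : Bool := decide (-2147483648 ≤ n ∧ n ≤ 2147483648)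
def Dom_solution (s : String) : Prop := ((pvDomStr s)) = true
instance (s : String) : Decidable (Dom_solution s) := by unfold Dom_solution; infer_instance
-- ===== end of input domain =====

-- B replaces A's flat in-place pass with a word-position counter by a split(' ') / per-word enumerate / join(' ') decomposition (idiomatic, same cost).

-- ===== PORT A =====
-- Literal port of A: s = list(s); index = 1; for i in range(len(s)): mutate s[i] in place; return ''.join(s).
-- s[i].upper()/.lower() on a one-character string is PySem.Chars.upperChar/lowerChar (exact on the ASCII domain).
def solution (s : String) : String :=
  let cs := s.toList
  let r := (PySem.List.pyRange 0 (PySem.Str.len s) 1).foldl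
    (fun (st : List Char × Int) i =>
      let c := PySem.List.pyGetD st.1 i ' '
      if c = ' ' then (st.1, 1)
      else if PySem.Int.mod st.2 2 = 1 then
        (PySem.List.pySetD st.1 i (PySem.Chars.upperChar c), st.2 + 1)
      else
        (PySem.List.pySetD st.1 i (PySem.Chars.lowerChar c), st.2 + 1))
    (cs, 1)
  String.ofList (PySem.Chars.join [] (r.1.map (fun c => [c])))  -- ''.join(s) over one-char strings

-- ===== PORT B =====
-- Literal port of B: ' '.join of, for each w in s.split(' '), the word rebuilt from enumerate(w)
-- (c.upper() if i % 2 == 0 else c.lower()); the inner ''.join over one-char strings is String.ofList.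
def solution_alt (s : String) : String :=
  PySem.Str.join " " (((PySem.Str.split? s " ").getD []).map (fun w =>
    String.ofList ((PySem.List.enumerate w.toList 0).map
      (fun p => if PySem.Int.mod p.1 2 = 0 then PySem.Chars.upperChar p.2
                else PySem.Chars.lowerChar p.2))))

-- ===== PRECONDITION & SPEC =====
def Spec_solution (s : String) (out : String) : Prop := out = solution_alt s
instance (s : String) (out : String) : Decidable (Spec_solution s out) := by unfold Spec_solution; infer_instance

-- ===== CLAIM (what is proved, stated in full; the proofs are below) =====
def Claim_equal_solution : Prop := ∀ (s : String), Dom_solution s → Spec_solution s (solution s)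

-- ===== LEMMAS AND PROOFS =====

-- the per-character transform B applies at enumerate index i
def pvF2 (p : Int × Char) : Char :=
  if PySem.Int.mod p.1 2 = 0 then PySem.Chars.upperChar p.2 else PySem.Chars.lowerChar p.2

-- what A's loop computes on the character list, with the running 'index'
def pvTA : List Char → Int → List Char
  | [], _ => []
  | c :: cs, idx =>
    if c = ' ' then ' ' :: pvTA cs 1
    else (if PySem.Int.mod idx 2 = 1 then PySem.Chars.upperChar c else PySem.Chars.lowerChar c)
         :: pvTA cs (idx + 1)

-- structural split on a single space (reference model for PySem.Chars.splitOn · [' '])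
def pvModHead (p : List Char) : List (List Char) → List (List Char)
  | [] => [p]
  | w :: ws => (p ++ w) :: ws

def pvSplitSp : List Char → List (List Char)
  | [] => [[]]
  | c :: cs => if c = ' ' then [] :: pvSplitSp cs else pvModHead [c] (pvSplitSp cs)

-- B's join of transformed words, with the enumerate start of the first word generalized
def pvJB (j : Int) : List (List Char) → List Char
  | [] => []
  | [w] => (PySem.List.enumerate w j).map pvF2
  | w :: w' :: ws => (PySem.List.enumerate w j).map pvF2 ++ ' ' :: pvJB 0 (w' :: ws)

theorem pvSplitSp_ne_nil (cs : List Char) : pvSplitSp cs ≠ [] := by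
  cases cs with
  | nil => simp [pvSplitSp]
  | cons c cs =>
    simp only [pvSplitSp]
    split
    · simp
    · cases h : pvSplitSp cs <;> simp [pvModHead]

theorem pvGo_eq (fuel : Nat) : ∀ (l cur : List Char) (acc : List (List Char)),
    l.length < fuel →
    PySem.Chars.splitOn.go [' '] fuel l cur acc
      = acc.reverse ++ pvModHead cur.reverse (pvSplitSp l) := by
  induction fuel with
  | zero => intro l cur acc h; omega
  | succ fuel ih =>
    intro l cur acc h
    cases l with
    | nil => simp [PySem.Chars.splitOn.go, pvSplitSp, pvModHead]
    | cons c rest =>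
      simp only [PySem.Chars.splitOn.go]
      by_cases hc : c = ' '
      · subst hc
        rw [if_pos (by simp [List.isPrefixOf])]
        simp only [List.length_cons, List.length_nil, List.drop_succ_cons, List.drop_zero]
        rw [ih rest [] (cur.reverse :: acc) (by simpa using Nat.lt_of_succ_lt_succ h)]
        simp only [pvSplitSp]
        cases hs : pvSplitSp rest with
        | nil => exact absurd hs (pvSplitSp_ne_nil rest)
        | cons w ws => simp [pvModHead]
      · rw [if_neg (by simp [List.isPrefixOf, Ne.symm hc])]
        rw [ih rest (c :: cur) acc (by simpa using Nat.lt_of_succ_lt_succ h)]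
        simp only [pvSplitSp, if_neg hc]
        cases hs : pvSplitSp rest with
        | nil => exact absurd hs (pvSplitSp_ne_nil rest)
        | cons w ws => simp [pvModHead]

theorem pvSplitOn_eq (cs : List Char) : PySem.Chars.splitOn cs [' '] = pvSplitSp cs := by
  rw [PySem.Chars.splitOn, pvGo_eq (cs.length + 1) cs [] [] (by omega)]
  cases hs : pvSplitSp cs with
  | nil => exact absurd hs (pvSplitSp_ne_nil cs)
  | cons w ws => simp [pvModHead]

-- A's transform equals B's join over the split, with the first word's enumerate start generalized
theorem pvTA_eq_jB (cs : List Char) : ∀ (j : Int), 0 ≤ j → pvTA cs (j + 1) = pvJB j (pvSplitSp cs) := by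
  induction cs with
  | nil => intro j _; simp [pvTA, pvSplitSp, pvJB, PySem.List.enumerate]
  | cons c cs ih =>
    intro j hj
    by_cases hc : c = ' '
    · subst hc
      have h1 : pvTA (' ' :: cs) (j + 1) = ' ' :: pvTA cs (0 + 1) := by simp [pvTA]
      rw [h1, ih 0 le_rfl]
      simp only [pvSplitSp]
      cases hs : pvSplitSp cs with
      | nil => exact absurd hs (pvSplitSp_ne_nil cs)
      | cons w ws =>
        cases ws <;> simp [pvJB, PySem.List.enumerate]
    · have hmod : (PySem.Int.mod (j + 1) 2 = 1) ↔ (PySem.Int.mod j 2 = 0) := by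
        rw [show PySem.Int.mod (j + 1) 2 = (j + 1) % 2 from
              PySem.Int.mod_eq_emod_of_pos (by norm_num),
            show PySem.Int.mod j 2 = j % 2 from PySem.Int.mod_eq_emod_of_pos (by norm_num)]
        omega
      have h1 : pvTA (c :: cs) (j + 1) = pvF2 (j, c) :: pvTA cs ((j + 1) + 1) := by
        simp only [pvTA, if_neg hc, pvF2]
        by_cases h : PySem.Int.mod j 2 = 0
        · rw [if_pos (hmod.mpr h), if_pos h]
        · rw [if_neg (fun hh => h (hmod.mp hh)), if_neg h]
      rw [h1, ih (j + 1) (by omega)]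
      simp only [pvSplitSp, if_neg hc]
      cases hs : pvSplitSp cs with
      | nil => exact absurd hs (pvSplitSp_ne_nil cs)
      | cons w ws =>
        cases ws <;> simp [pvModHead, pvJB, PySem.List.enumerate_cons]

-- B's nested join structure equals pvJB 0
theorem pvJB_eq_join (wss : List (List Char)) (hne : wss ≠ []) :
    PySem.Chars.join [' '] (wss.map (fun w => (PySem.List.enumerate w 0).map pvF2))
      = pvJB 0 wss := by
  induction wss with
  | nil => exact absurd rfl hne
  | cons w ws ih =>
    cases ws with
    | nil => simp [pvJB, PySem.Chars.join, List.intercalate]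
    | cons w' ws' =>
      simp only [List.map_cons] at ih ⊢
      rw [PySem.Chars.join_cons_cons, ih (by simp)]
      simp [pvJB]

-- A's fold with in-place writes, as an invariant over processed prefix / untouched suffix
theorem pvFoldA (suf : List Char) : ∀ (pre : List Char) (idx : Int) (n : Int),
    n = (pre.length : Int) + (suf.length : Int) →
    ((PySem.List.pyRange (pre.length : Int) n 1).foldl
      (fun (st : List Char × Int) i =>
        let c := PySem.List.pyGetD st.1 i ' '
        if c = ' ' then (st.1, 1)
        else if PySem.Int.mod st.2 2 = 1 then
          (PySem.List.pySetD st.1 i (PySem.Chars.upperChar c), st.2 + 1)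
        else
          (PySem.List.pySetD st.1 i (PySem.Chars.lowerChar c), st.2 + 1))
      (pre ++ suf, idx)).1 = pre ++ pvTA suf idx := by
  induction suf with
  | nil =>
    intro pre idx n hn
    rw [PySem.List.pyRange_one_eq_nil (by simp at hn; omega)]
    simp [pvTA]
  | cons c rest ih =>
    intro pre idx n hn
    rw [PySem.List.pyRange_one_cons (by simp only [List.length_cons] at hn; push_cast at hn; omega)]
    simp only [List.foldl_cons]
    have hget : PySem.List.pyGetD (pre ++ c :: rest) (pre.length : Int) ' ' = c := by
      simp [PySem.List.pyGetD_natCast]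
    by_cases hc : c = ' '
    · simp only [hget, if_pos hc]
      have hn' : n = (((pre ++ [c]).length : Nat) : Int) + (rest.length : Int) := by
        simp only [List.length_cons, List.length_append, List.length_nil] at hn ⊢
        push_cast at hn ⊢; omega
      have := ih (pre ++ [c]) 1 n hn'
      rw [show pre ++ c :: rest = (pre ++ [c]) ++ rest by simp,
          show ((pre.length : Int) + 1) = (((pre ++ [c]).length : Nat) : Int) by simp,
          this]
      simp [pvTA, hc]
    · simp only [hget, if_neg hc]
      by_cases hm : PySem.Int.mod idx 2 = 1
      · simp only [if_pos hm]
        have hset : PySem.List.pySetD (pre ++ c :: rest) (pre.length : Int) (PySem.Chars.upperChar c)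
            = pre ++ PySem.Chars.upperChar c :: rest := by
          simp [PySem.List.pySetD_natCast]
        have hn' : n = (((pre ++ [PySem.Chars.upperChar c]).length : Nat) : Int) + (rest.length : Int) := by
          simp only [List.length_cons, List.length_append, List.length_nil] at hn ⊢
          push_cast at hn ⊢; omega
        have := ih (pre ++ [PySem.Chars.upperChar c]) (idx + 1) n hn'
        rw [hset,
            show pre ++ PySem.Chars.upperChar c :: rest = (pre ++ [PySem.Chars.upperChar c]) ++ rest by simp,
            show ((pre.length : Int) + 1) = (((pre ++ [PySem.Chars.upperChar c]).length : Nat) : Int) by simp,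
            this]
        simp only [pvTA, if_neg hc, if_pos hm, List.append_assoc, List.singleton_append]
      · simp only [if_neg hm]
        have hset : PySem.List.pySetD (pre ++ c :: rest) (pre.length : Int) (PySem.Chars.lowerChar c)
            = pre ++ PySem.Chars.lowerChar c :: rest := by
          simp [PySem.List.pySetD_natCast]
        have hn' : n = (((pre ++ [PySem.Chars.lowerChar c]).length : Nat) : Int) + (rest.length : Int) := by
          simp only [List.length_cons, List.length_append, List.length_nil] at hn ⊢
          push_cast at hn ⊢; omega
        have := ih (pre ++ [PySem.Chars.lowerChar c]) (idx + 1) n hn'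
        rw [hset,
            show pre ++ PySem.Chars.lowerChar c :: rest = (pre ++ [PySem.Chars.lowerChar c]) ++ rest by simp,
            show ((pre.length : Int) + 1) = (((pre ++ [PySem.Chars.lowerChar c]).length : Nat) : Int) by simp,
            this]
        simp only [pvTA, if_neg hc, if_neg hm, List.append_assoc, List.singleton_append]

theorem solution_eq_tA (s : String) : solution s = String.ofList (pvTA s.toList 1) := by
  have h0 := pvFoldA s.toList [] 1 ((s.toList.length : Nat) : Int) (by simp)
  simp only [List.nil_append, List.length_nil, Nat.cast_zero] at h0
  show String.ofList (PySem.Chars.join [] (((PySem.List.pyRange 0 ((s.toList.length : Nat) : Int) 1).foldl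
      (fun (st : List Char × Int) i =>
        if PySem.List.pyGetD st.1 i ' ' = ' ' then (st.1, 1)
        else if PySem.Int.mod st.2 2 = 1 then
          (PySem.List.pySetD st.1 i (PySem.Chars.upperChar (PySem.List.pyGetD st.1 i ' ')), st.2 + 1)
        else
          (PySem.List.pySetD st.1 i (PySem.Chars.lowerChar (PySem.List.pyGetD st.1 i ' ')), st.2 + 1))
      (s.toList, 1)).1.map (fun c => [c]))) = String.ofList (pvTA s.toList 1)
  rw [h0, PySem.Chars.join_nil_singletons]

theorem solution_alt_eq (s : String) :
    solution_alt s = String.ofList (pvJB 0 (pvSplitSp s.toList)) := by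
  unfold solution_alt
  have h1 : PySem.Str.split? s " " = some ((pvSplitSp s.toList).map String.ofList) := by
    rw [show PySem.Str.split? s " " = (PySem.Chars.split? s.toList (" ").toList).map (fun x => x.map String.ofList) from rfl]
    rw [show (" ").toList = [' '] by decide]
    simp [PySem.Chars.split?, pvSplitOn_eq]
  rw [h1]
  simp only [Option.getD_some, List.map_map]
  rw [show PySem.Str.join = fun sep parts => String.ofList (PySem.Chars.join sep.toList (parts.map String.toList)) from rfl]
  simp only [List.map_map]
  rw [show (" ").toList = [' '] by decide]
  rw [← pvJB_eq_join _ (pvSplitSp_ne_nil s.toList)]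
  congr 2
  apply List.map_congr_left
  intro w _
  simp [pvF2]

-- ===== VERDICT (by name: the statement is the Claim_ definition above) =====
theorem solution_spec : Claim_equal_solution := by
  intro s _
  unfold Spec_solution
  rw [solution_eq_tA, solution_alt_eq,
      show (1 : Int) = 0 + 1 from rfl, pvTA_eq_jB s.toList 0 le_rfl]
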